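-- pv_equiv track=rewrite | github.com/takabrk/vipertools | numbers_yosou/numbers.py | deldouble
-- ===== SOURCE A (Python) =====
-- def deldouble(rs):
--     d4 = []
--     for i in range(10):
--         for j in range(10):
--             try:
--                 d4.append(i*1000+i*100+j*10+j)
--                 d4.append(i*1000+j*100+i*10+j)
--                 d4.append(i*1000+j*100+j*10+i)
--                 d4.append(j*1000+i*100+i*10+j)
--                 d4.append(j*1000+i*100+j*10+i)
--                 d4.append(j*1000+j*100+i*10+i)
--             except:pass
--     d4 = set(sorted(d4))
--     for i in d4:
--         try:
--             rs.remove(i)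
--         except:pass
--     return rs
-- ===== SOURCE B (Python) =====
-- def deldouble(rs):
--     # One pass over rs with a pending set, instead of A's per-value rs.remove scans.
--     d4 = set(v
--              for i in range(10)
--              for j in range(10)
--              for v in (i*1000+i*100+j*10+j,
--                        i*1000+j*100+i*10+j,
--                        i*1000+j*100+j*10+i,
--                        j*1000+i*100+i*10+j,
--                        j*1000+i*100+j*10+i,
--                        j*1000+j*100+i*10+i))
--     out = []
--     for x in rs:
--         if x in d4:
--             d4.discard(x)
--         else:
--             out.append(x)
--     rs[:] = out
--     return rs
-- ===== Notes on version B (the rewrite author's own statement) =====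
-- stated objective: faster
-- what changed: Instead of calling rs.remove(v) (a scan of rs) for each of the ~60 double-digit values, B builds the value set once and makes a single pass over rs with a pending set, skipping the first occurrence of each pending value; the result is written back with rs[:] = out.
import Mathlib
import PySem

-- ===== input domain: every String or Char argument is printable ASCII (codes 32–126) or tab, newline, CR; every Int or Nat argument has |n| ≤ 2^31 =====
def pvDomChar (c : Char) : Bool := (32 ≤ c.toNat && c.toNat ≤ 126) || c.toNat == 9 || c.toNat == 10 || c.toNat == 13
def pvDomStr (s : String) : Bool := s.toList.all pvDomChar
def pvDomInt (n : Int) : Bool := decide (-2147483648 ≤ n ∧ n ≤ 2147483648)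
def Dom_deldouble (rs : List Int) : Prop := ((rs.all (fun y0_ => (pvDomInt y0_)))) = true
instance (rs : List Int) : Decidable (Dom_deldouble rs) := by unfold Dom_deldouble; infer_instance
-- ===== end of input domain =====

-- B replaces A's per-value rs.remove scans by one pass over rs with a pending set (return value and
-- final in-place contents of rs coincide; both mutate rs in place in Python).

-- ===== PORT A =====
-- the six candidate values appended for a digit pair (i, j)
def pvSix (i j : Int) : List Int :=
  [i*1000+i*100+j*10+j, i*1000+j*100+i*10+j, i*1000+j*100+j*10+i,
   j*1000+i*100+i*10+j, j*1000+i*100+j*10+i, j*1000+j*100+i*10+i]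

def deldouble (rs : List Int) : List Int :=
  let d4 : List Int :=
    (PySem.List.pyRange 0 10 1).foldl (fun acc i =>
      (PySem.List.pyRange 0 10 1).foldl (fun acc j => acc ++ pvSix i j) acc) []
  let d4s : PySem.Set Int := PySem.Set.ofList (PySem.List.sorted d4 (fun x => x) false)
  -- Python iterates the set in hash order; the final list does not depend on the order,
  -- since removals of the first occurrences of DISTINCT values commute.
  d4s.foldl (fun acc v => (PySem.List.remove? acc v).getD acc) rs

-- ===== PORT B =====
-- Source B's single pass: skip x and discard it from the pending set if pending, else keep x
def pvPass (rs : List Int) (pending : PySem.Set Int) : List Int :=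
  match rs with
  | [] => []
  | x :: xs =>
      if PySem.Set.contains pending x then pvPass xs (PySem.Set.discard pending x)
      else x :: pvPass xs pending

def deldouble_alt (rs : List Int) : List Int :=
  let d4 : PySem.Set Int :=
    PySem.Set.ofList ((PySem.List.pyRange 0 10 1).flatMap (fun i =>
      (PySem.List.pyRange 0 10 1).flatMap (fun j => pvSix i j)))
  pvPass rs d4

-- ===== PRECONDITION & SPEC =====
def Spec_deldouble (rs : List Int) (out : List Int) : Prop := out = deldouble_alt rs
instance (rs : List Int) (out : List Int) : Decidable (Spec_deldouble rs out) := by unfold Spec_deldouble; infer_instance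

-- ===== CLAIM (what is proved, stated in full; the proofs are below) =====
def Claim_equal_deldouble : Prop := ∀ (rs : List Int), Dom_deldouble rs → Spec_deldouble rs (deldouble rs)

-- ===== LEMMAS AND PROOFS =====

-- total form of Python's list.remove is List.erase
theorem pv_removeD_eq_erase (acc : List Int) (v : Int) :
    (PySem.List.remove? acc v).getD acc = acc.erase v := by
  by_cases h : v ∈ acc
  · rw [PySem.List.remove?_eq_some_erase acc v h]; rfl
  · rw [(PySem.List.remove?_eq_none_iff acc v).mpr h, List.erase_of_not_mem h]; rfl

theorem pv_contains_iff (p : List Int) (x : Int) :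
    PySem.Set.contains p x = true ↔ x ∈ p := by
  simp [PySem.Set.contains]

theorem pv_erase_cons_ne (x v : Int) (l : List Int) (h : x ≠ v) :
    (x :: l).erase v = x :: l.erase v := by
  simp [h]

theorem pv_discard_eq_erase (p : List Int) (x : Int) (hp : p.Nodup) :
    PySem.Set.discard p x = p.erase x := by
  rw [hp.erase_eq_filter]; rfl

-- pvPass only looks at the pending set through membership and single-element erasure
theorem pvPass_congr (rs : List Int) :
    ∀ (p q : List Int), p.Nodup → q.Nodup → (∀ x, x ∈ p ↔ x ∈ q) → pvPass rs p = pvPass rs q := by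
  induction rs with
  | nil => intro p q _ _ _; rfl
  | cons x xs ih =>
      intro p q hp hq hmem
      simp only [pvPass]
      by_cases hx : x ∈ p
      · have hxq : x ∈ q := (hmem x).mp hx
        rw [if_pos ((pv_contains_iff p x).mpr hx), if_pos ((pv_contains_iff q x).mpr hxq),
          pv_discard_eq_erase p x hp, pv_discard_eq_erase q x hq]
        exact ih _ _ (hp.erase x) (hq.erase x)
          (fun y => by rw [hp.mem_erase_iff, hq.mem_erase_iff, hmem y])
      · have hxq : x ∉ q := fun h => hx ((hmem x).mpr h)
        rw [if_neg (fun h => hx ((pv_contains_iff p x).mp h)),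
          if_neg (fun h => hxq ((pv_contains_iff q x).mp h))]
        exact congrArg (x :: ·) (ih _ _ hp hq hmem)

-- pulling one pending value out of the pass = erasing its first occurrence up front
theorem pvPass_cons_pending (v : Int) :
    ∀ (rs p : List Int), p.Nodup → v ∉ p → pvPass rs (v :: p) = pvPass (rs.erase v) p := by
  intro rs
  induction rs with
  | nil => intro p _ _; rfl
  | cons x xs ih =>
      intro p hp hv
      have hnd : (v :: p).Nodup := List.nodup_cons.mpr ⟨hv, hp⟩
      by_cases hxv : x = v
      · subst hxv
        simp only [pvPass, List.erase_cons_head]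
        rw [if_pos ((pv_contains_iff _ x).mpr (by simp)), pv_discard_eq_erase _ x hnd,
          List.erase_cons_head]
      · simp only [pvPass]
        by_cases hxp : x ∈ p
        · rw [if_pos ((pv_contains_iff _ x).mpr (by simp [hxp])),
            pv_discard_eq_erase _ x hnd, pv_erase_cons_ne v x p (fun h => hxv h.symm),
            pv_erase_cons_ne x v xs hxv]
          simp only [pvPass]
          rw [if_pos ((pv_contains_iff p x).mpr hxp), pv_discard_eq_erase p x hp]
          exact ih (p.erase x) (hp.erase x) (fun h => hv (List.mem_of_mem_erase h))
        · have hxvp : x ∉ v :: p := by simp [hxv, hxp]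
          rw [if_neg (fun h => hxvp ((pv_contains_iff _ x).mp h)),
            pv_erase_cons_ne x v xs hxv]
          simp only [pvPass]
          rw [if_neg (fun h => hxp ((pv_contains_iff p x).mp h))]
          exact congrArg (x :: ·) (ih p hp hv)

-- A's removal loop over a duplicate-free value list = B's single pass with that list as pending
theorem pv_foldl_erase_eq_pass :
    ∀ (L : List Int), L.Nodup → ∀ (rs : List Int),
      L.foldl (fun acc v => acc.erase v) rs = pvPass rs L := by
  intro L
  induction L with
  | nil =>
      intro _ rs
      induction rs with
      | nil => rfl
      | cons x xs ih =>
          simp only [List.foldl_nil, pvPass]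
          rw [if_neg (fun h => (by simp at h : False))]
          exact congrArg (x :: ·) (by simpa using ih)
  | cons v L ih =>
      intro hnd rs
      have hv : v ∉ L := (List.nodup_cons.mp hnd).1
      have hL : L.Nodup := (List.nodup_cons.mp hnd).2
      rw [List.foldl_cons, ih hL, pvPass_cons_pending v rs L hL hv]

-- ===== VERDICT (by name: the statement is the Claim_ definition above) =====
theorem deldouble_spec : Claim_equal_deldouble := by
  intro rs _
  show deldouble rs = deldouble_alt rs
  unfold deldouble deldouble_alt
  simp only [pv_removeD_eq_erase, PySem.List.foldl_append_eq_flatMap, List.nil_append]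
  rw [pv_foldl_erase_eq_pass _ (PySem.Set.nodup_ofList _)]
  exact pvPass_congr rs _ _ (PySem.Set.nodup_ofList _) (PySem.Set.nodup_ofList _)
    (fun x => by rw [PySem.Set.mem_ofList, PySem.Set.mem_ofList, PySem.List.mem_sorted])
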